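-- pv_equiv track=rewrite | github.com/dongyingdepingguo/PTA | PTA1022.py | f
-- ===== SOURCE A (Python) =====
-- def f(N):
--     if N[2] > 10 or N[2] <= 1:
--         exit()
--     E = []
--     C = N[0] + N[1]
--     while C > 0:
--         Y = C % N[2]
--         C = C // N[2]
--         E.append(str(Y))
--     E.reverse()
--     return ''.join(E)
-- ===== SOURCE B (Python) =====
-- def f(N):
--     if N[2] > 10 or N[2] <= 1:
--         exit()
--
--     def conv(c):
--         if c <= 0:
--             return ''
--         return conv(c // N[2]) + str(c % N[2])
--
--     return conv(N[0] + N[1])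
-- ===== Notes on version B (the rewrite author's own statement) =====
-- stated objective: simpler
-- what changed: Replaces the accumulate-digits-then-reverse while loop with a direct recursion that emits digits most-significant-first, so no list, append, reverse or join is needed.
import Mathlib
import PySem

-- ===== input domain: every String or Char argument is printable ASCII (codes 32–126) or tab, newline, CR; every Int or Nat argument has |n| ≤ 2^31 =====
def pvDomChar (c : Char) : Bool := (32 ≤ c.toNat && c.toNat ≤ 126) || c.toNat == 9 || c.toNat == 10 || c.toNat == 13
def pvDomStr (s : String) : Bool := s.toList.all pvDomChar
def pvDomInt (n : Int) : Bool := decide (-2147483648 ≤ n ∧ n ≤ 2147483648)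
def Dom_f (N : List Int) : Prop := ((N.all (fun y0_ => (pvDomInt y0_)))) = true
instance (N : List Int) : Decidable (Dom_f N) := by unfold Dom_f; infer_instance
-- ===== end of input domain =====

-- ===== PORT A =====
-- B differs from A only in decomposition (recursion emitting digits MSB-first vs
-- loop + reverse + join); guard and arithmetic are identical.
-- 'while C > 0' loop of A, with fuel = C.toNat (enough iterations for any base ≥ 2,
-- which Pre_f guarantees); appends str(C % b) and divides C by b each step.
def portALoop (b : Int) (fuel : Nat) (C : Int) (E : List String) : List String :=
  match fuel with
  | 0 => E
  | fuel + 1 =>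
    if C > 0 then
      portALoop b fuel (PySem.Int.floordiv C b) (E ++ [PySem.Int.toStr (PySem.Int.mod C b)])
    else E

def f (N : List Int) : String :=
  match PySem.List.pyGet? N 2 with
  | none => ""  -- IndexError: excluded by Pre_f
  | some b =>
    if b > 10 ∨ b ≤ 1 then ""  -- exit(): excluded by Pre_f
    else
      match PySem.List.pyGet? N 0, PySem.List.pyGet? N 1 with
      | some a0, some a1 =>
        let C := a0 + a1
        PySem.Str.join "" (portALoop b C.toNat C []).reverse
      | _, _ => ""

-- ===== PORT B =====
-- conv(c) of B: '' for c ≤ 0, else conv(c // b) + str(c % b); same fuel convention.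
def portBConv (b : Int) (fuel : Nat) (c : Int) : String :=
  match fuel with
  | fuel + 1 =>
    if c ≤ 0 then ""
    else portBConv b fuel (PySem.Int.floordiv c b) ++ PySem.Int.toStr (PySem.Int.mod c b)
  | 0 => ""

def f_alt (N : List Int) : String :=
  (PySem.List.pyGet? N 2).elim "" fun b =>  -- none = IndexError: excluded by Pre_f
    if b > 10 ∨ b ≤ 1 then ""  -- exit(): excluded by Pre_f
    else
      (PySem.List.pyGet? N 0).elim "" fun a0 =>
        (PySem.List.pyGet? N 1).elim "" fun a1 =>
          portBConv b (a0 + a1).toNat (a0 + a1)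

-- ===== PRECONDITION & SPEC =====
-- Pre_f excludes only inputs where A raises: len(N) < 3 (IndexError) or a base
-- outside (1, 10] (exit() / SystemExit).
def Pre_f (N : List Int) : Prop := 3 ≤ N.length ∧ 1 < N.getD 2 0 ∧ N.getD 2 0 ≤ 10
instance (N : List Int) : Decidable (Pre_f N) := by unfold Pre_f; infer_instance

def pvWitness_f : List Int := [5, 7, 2]

def Spec_f (N : List Int) (out : String) : Prop := out = f_alt N
instance (N : List Int) (out : String) : Decidable (Spec_f N out) := by unfold Spec_f; infer_instance

-- ===== CLAIM (what is proved, stated in full; the proofs are below) =====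
def Claim_equal_f : Prop := ∀ (N : List Int), Dom_f N → Pre_f N → Spec_f N (f N)

-- ===== LEMMAS AND PROOFS =====
theorem join_nil_str : PySem.Str.join "" [] = "" := by decide

theorem join_cons_str (x : String) (xs : List String) :
    PySem.Str.join "" (x :: xs) = x ++ PySem.Str.join "" xs := by
  cases xs with
  | nil => simp [PySem.Str.join]
  | cons y ys =>
    simp only [PySem.Str.join]
    apply String.toList_injective
    simp [PySem.Chars.join_cons_cons]

theorem portALoop_join (b : Int) (fuel : Nat) : ∀ (C : Int) (E : List String),
    PySem.Str.join "" (portALoop b fuel C E).reverse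
      = portBConv b fuel C ++ PySem.Str.join "" E.reverse := by
  induction fuel with
  | zero => intro C E; simp [portALoop, portBConv]
  | succ n ih =>
    intro C E
    by_cases h : C > 0
    · have h' : ¬ C ≤ 0 := by omega
      simp only [portALoop, portBConv, h, h', if_pos, if_neg, not_false_iff]
      rw [ih]
      simp [List.reverse_append, join_cons_str, String.append_assoc]
    · have h' : C ≤ 0 := by omega
      simp [portALoop, portBConv, h, h']

-- ===== VERDICT =====
theorem f_spec : Claim_equal_f := by
  intro N _ _
  unfold Spec_f f f_alt
  cases h2 : PySem.List.pyGet? N 2 with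
  | none => rfl
  | some b =>
    cases h0 : PySem.List.pyGet? N 0 with
    | none => simp
    | some a0 =>
      cases h1 : PySem.List.pyGet? N 1 with
      | none => simp
      | some a1 =>
        simp only [Option.elim]
        split
        · rfl
        · simp only [portALoop_join, List.reverse_nil, join_nil_str]
          simp [String.append_empty]
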